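-- pv_equiv track=rewrite | github.com/Adil-Aquil-Ahmad/AI-Money-Mentor | backend/engine/rule_engine.py | _prioritize_goals
-- ===== SOURCE A (Python) =====
-- GOAL_PRIORITY = {
--     "buy a house": 100,
--     "house": 100,
--     "retirement": 90,
--     "education": 85,
--     "buy a car": 60,
--     "car": 60,
-- }
--
-- def _prioritize_goals(goals: list[str]) -> list[str]:
--     cleaned = []
--     for goal in goals or []:
--         text = str(goal).strip().lower()
--         if not text:
--             continue
--         if "house" in text or "home" in text:
--             canonical = "buy a house"
--         elif "car" in text or "vehicle" in text or "auto" in text: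
--             canonical = "buy a car"
--         else:
--             canonical = text
--         if canonical not in cleaned:
--             cleaned.append(canonical)
--     return sorted(cleaned, key=lambda item: (-GOAL_PRIORITY.get(item, 50), item))
-- ===== SOURCE B (Python) =====
-- GOAL_PRIORITY = {
--     "buy a house": 100,
--     "house": 100,
--     "retirement": 90,
--     "education": 85,
--     "buy a car": 60,
--     "car": 60,
-- }
--
-- def _prioritize_goals(goals: list[str]) -> list[str]:
--     canon = []
--     for goal in goals or []:
--         text = str(goal).strip().lower()
--         if not text:
--             continue
--         if "house" in text or "home" in text:
--             canon.append("buy a house")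
--         elif "car" in text or "vehicle" in text or "auto" in text:
--             canon.append("buy a car")
--         else:
--             canon.append(text)
--     ordered = sorted(canon, key=lambda item: (-GOAL_PRIORITY.get(item, 50), item))
--     result = []
--     for item in ordered:
--         if not result or result[-1] != item:
--             result.append(item)
--     return result
-- ===== Notes on version B (the rewrite author's own statement) =====
-- stated objective: faster
-- what changed: A dedups with an O(n^2) membership scan while collecting, then sorts; B collects all canonical strings with duplicates, sorts them with the same key, and dedups in one linear adjacent-comparison pass over the sorted list (sort-then-adjacent-dedup instead of membership-dedup-then-sort).
import Mathlib
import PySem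

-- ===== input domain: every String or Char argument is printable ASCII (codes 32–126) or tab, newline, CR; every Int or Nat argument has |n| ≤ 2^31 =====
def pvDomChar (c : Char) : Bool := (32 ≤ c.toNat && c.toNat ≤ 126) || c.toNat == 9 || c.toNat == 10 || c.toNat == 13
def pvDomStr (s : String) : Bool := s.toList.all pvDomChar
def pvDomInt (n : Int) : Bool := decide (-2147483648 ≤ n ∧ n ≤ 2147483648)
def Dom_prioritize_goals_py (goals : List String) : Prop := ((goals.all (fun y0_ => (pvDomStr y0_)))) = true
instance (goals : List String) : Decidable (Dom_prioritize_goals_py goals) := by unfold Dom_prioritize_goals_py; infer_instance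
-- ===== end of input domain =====

-- B replaces A's collect-with-membership-dedup-then-sort by collect-all-then-sort-then-adjacent-dedup; alternative decomposition, same results.

-- ===== PORT A =====
-- GOAL_PRIORITY (module constant)
def pvGoalPriority : PySem.Dict String Int :=
  PySem.Dict.ofList [("buy a house", 100), ("house", 100), ("retirement", 90),
                     ("education", 85), ("buy a car", 60), ("car", 60)]

-- the loop body's canonicalisation (identical lines in A and in B): strip/lower, skip empty, map to canonical
def pvCanonical (goal : String) : Option String :=
  let text := PySem.Str.lower (PySem.Str.strip goal)
  if text = "" then none
  else if PySem.Str.isIn "house" text || PySem.Str.isIn "home" text then some "buy a house"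
  else if PySem.Str.isIn "car" text || PySem.Str.isIn "vehicle" text || PySem.Str.isIn "auto" text then some "buy a car"
  else some text

def prioritize_goals_py (goals : List String) : List String :=
  let cleaned := goals.foldl (fun cleaned goal =>
    match pvCanonical goal with
    | none => cleaned
    | some canonical => if cleaned.contains canonical then cleaned else cleaned ++ [canonical]) []
  PySem.List.sorted2 cleaned (fun item => -(pvGoalPriority.getD item 50)) (fun item => item) false

-- ===== PORT B =====
def prioritize_goals_py_alt (goals : List String) : List String :=
  let canon := goals.foldl (fun canon goal =>
    match pvCanonical goal with
    | none => canon
    | some c => canon ++ [c]) []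
  let ordered := PySem.List.sorted2 canon (fun item => -(pvGoalPriority.getD item 50)) (fun item => item) false
  ordered.foldl (fun result item =>
    if result.isEmpty || !(result.getLast? == some item) then result ++ [item] else result) []

-- ===== PRECONDITION & SPEC =====
def Spec_prioritize_goals_py (goals : List String) (out : List String) : Prop := out = prioritize_goals_py_alt goals
instance (goals : List String) (out : List String) : Decidable (Spec_prioritize_goals_py goals out) := by unfold Spec_prioritize_goals_py; infer_instance

-- ===== CLAIM (what is proved, stated in full; the proofs are below) =====
def Claim_equal_prioritize_goals_py : Prop := ∀ (goals : List String), Dom_prioritize_goals_py goals → Spec_prioritize_goals_py goals (prioritize_goals_py goals)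

-- ===== LEMMAS AND PROOFS =====

-- the strict comparison sorted2 uses for A's/B's key (-priority, item)
def pvBf (a b : String) : Bool :=
  decide (-(pvGoalPriority.getD a 50) < -(pvGoalPriority.getD b 50)) ||
  (!decide (-(pvGoalPriority.getD b 50) < -(pvGoalPriority.getD a 50)) && decide (a < b))

-- boolean lexicographic comparison, characterised
lemma pv_lex_true_iff (x y : Int) (a b : String) :
    (decide (x < y) || (!decide (y < x) && decide (a < b))) = true ↔ (x < y ∨ (x = y ∧ a < b)) := by
  simp only [Bool.or_eq_true, Bool.and_eq_true, Bool.not_eq_eq_eq_not, Bool.not_true,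
    decide_eq_true_eq, decide_eq_false_iff_not]
  constructor
  · rintro (h | ⟨h1, h2⟩)
    · exact Or.inl h
    · by_cases hxy : x < y
      · exact Or.inl hxy
      · exact Or.inr ⟨by omega, h2⟩
  · rintro (h | ⟨h1, h2⟩)
    · exact Or.inl h
    · exact Or.inr ⟨by omega, h2⟩

lemma pv_lex_false_iff (x y : Int) (a b : String) :
    (decide (x < y) || (!decide (y < x) && decide (a < b))) = false ↔ (y < x ∨ (x = y ∧ ¬ a < b)) := by
  rw [← Bool.not_eq_true, pv_lex_true_iff]
  push Not
  constructor
  · rintro ⟨h1, h2⟩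
    by_cases hyx : y < x
    · exact Or.inl hyx
    · exact Or.inr ⟨by omega, h2 (by omega)⟩
  · rintro (h | ⟨h1, h2⟩)
    · exact ⟨by omega, fun hh => absurd hh (by omega)⟩
    · exact ⟨by omega, fun _ => h2⟩

lemma pvBf_true_iff (a b : String) : pvBf a b = true ↔
    (-(pvGoalPriority.getD a 50) < -(pvGoalPriority.getD b 50) ∨
     (-(pvGoalPriority.getD a 50) = -(pvGoalPriority.getD b 50) ∧ a < b)) := by
  unfold pvBf; exact pv_lex_true_iff _ _ a b

lemma pvBf_false_iff (a b : String) : pvBf a b = false ↔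
    (-(pvGoalPriority.getD b 50) < -(pvGoalPriority.getD a 50) ∨
     (-(pvGoalPriority.getD a 50) = -(pvGoalPriority.getD b 50) ∧ ¬ a < b)) := by
  unfold pvBf; exact pv_lex_false_iff _ _ a b

lemma pvBf_asym (a b : String) : pvBf a b = true → pvBf b a = false := by
  rw [pvBf_true_iff, pvBf_false_iff]
  rintro (h | ⟨h1, h2⟩)
  · exact Or.inl h
  · exact Or.inr ⟨h1.symm, lt_asymm h2⟩

lemma pvBf_total (a b : String) : pvBf a b = false → pvBf b a = false → a = b := by
  rw [pvBf_false_iff, pvBf_false_iff]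
  rintro (h1 | ⟨h1, h1'⟩) (h2 | ⟨h2, h2'⟩) <;> first
    | omega
    | exact le_antisymm (not_lt.mp h2') (not_lt.mp h1')

lemma pvBf_negtrans (a b c : String) : pvBf b a = false → pvBf c b = false → pvBf c a = false := by
  rw [pvBf_false_iff, pvBf_false_iff, pvBf_false_iff]
  rintro (h1 | ⟨h1, h1'⟩) (h2 | ⟨h2, h2'⟩)
  · exact Or.inl (by omega)
  · exact Or.inl (by omega)
  · exact Or.inl (by omega)
  · exact Or.inr ⟨by omega, not_lt.mpr (le_trans (not_lt.mp h1') (not_lt.mp h2'))⟩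

-- insertion sort machinery, generic over a boolean comparison
lemma pv_pairwise_insertBy {α : Type} (bf : α → α → Bool)
    (hasym : ∀ a b, bf a b = true → bf b a = false)
    (hnt : ∀ a b c, bf b a = false → bf c b = false → bf c a = false)
    (x : α) (acc : List α) (h : acc.Pairwise (fun a b => bf b a = false)) :
    (PySem.List.insertBy bf x acc).Pairwise (fun a b => bf b a = false) := by
  induction acc with
  | nil => simp [PySem.List.insertBy]
  | cons y ys ih =>
    rw [List.pairwise_cons] at h
    obtain ⟨hy, hys⟩ := h
    by_cases hxy : bf x y = true
    · rw [show PySem.List.insertBy bf x (y :: ys) = x :: y :: ys from by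
        simp [PySem.List.insertBy, hxy]]
      rw [List.pairwise_cons]
      refine ⟨?_, by rw [List.pairwise_cons]; exact ⟨hy, hys⟩⟩
      intro z hz
      rcases List.mem_cons.mp hz with rfl | hz
      · exact hasym x z hxy
      · exact hnt x y z (hasym x y hxy) (hy z hz)
    · rw [show PySem.List.insertBy bf x (y :: ys) = y :: PySem.List.insertBy bf x ys from by
        simp [PySem.List.insertBy, hxy]]
      rw [List.pairwise_cons]
      refine ⟨?_, ih hys⟩
      intro z hz
      rcases (PySem.List.mem_insertBy bf x z ys).mp hz with rfl | hz
      · exact Bool.not_eq_true _ ▸ hxy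
      · exact hy z hz

lemma pv_pairwise_foldl_insertBy {α : Type} (bf : α → α → Bool)
    (hasym : ∀ a b, bf a b = true → bf b a = false)
    (hnt : ∀ a b c, bf b a = false → bf c b = false → bf c a = false)
    (xs acc : List α) (hacc : acc.Pairwise (fun a b => bf b a = false)) :
    (List.foldl (fun acc x => PySem.List.insertBy bf x acc) acc xs).Pairwise
      (fun a b => bf b a = false) := by
  induction xs generalizing acc with
  | nil => exact hacc
  | cons g t ih => exact ih _ (pv_pairwise_insertBy bf hasym hnt g acc hacc)

-- the concrete sorted2 calls are this foldl
lemma pv_sorted2_eq (xs : List String) :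
    PySem.List.sorted2 xs (fun item => -(pvGoalPriority.getD item 50)) (fun item => item) false
      = List.foldl (fun acc x => PySem.List.insertBy pvBf x acc) [] xs := rfl

-- membership in adjacent-dedup
lemma pv_mem_destutter' (l : List String) (a x : String) (hx : x ∈ a :: l) :
    x ∈ List.destutter' (· ≠ ·) a l := by
  induction l generalizing a with
  | nil => simpa [List.destutter'] using hx
  | cons b t ih =>
    by_cases hab : a = b
    · rw [List.destutter'_cons_neg t (by simpa using hab)]
      apply ih a
      rcases List.mem_cons.mp hx with rfl | hx
      · exact List.mem_cons_self
      · rcases List.mem_cons.mp hx with rfl | hx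
        · exact (by rw [hab]; exact List.mem_cons_self)
        · exact List.mem_cons_of_mem a hx
    · rw [List.destutter'_cons_pos t (by simpa using hab)]
      rcases List.mem_cons.mp hx with rfl | hx
      · exact List.mem_cons_self
      · exact List.mem_cons_of_mem a (ih b hx)

-- adjacent-dedup of a (≤)-sorted list is strictly sorted
lemma pv_pairwise_destutter' (l : List String) (a : String)
    (h : (a :: l).Pairwise (fun x y => pvBf y x = false)) :
    (List.destutter' (· ≠ ·) a l).Pairwise (fun x y => pvBf x y = true) := by
  induction l generalizing a with
  | nil => simp [List.destutter']
  | cons b t ih =>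
    rw [List.pairwise_cons] at h
    obtain ⟨ha, htail⟩ := h
    by_cases hab : a = b
    · rw [List.destutter'_cons_neg t (by simpa using hab)]
      apply ih a
      rw [List.pairwise_cons] at htail ⊢
      exact ⟨fun y hy => ha y (List.mem_cons_of_mem b hy), htail.2⟩
    · rw [List.destutter'_cons_pos t (by simpa using hab)]
      rw [List.pairwise_cons]
      refine ⟨?_, ih b htail⟩
      intro z hz
      have hz' : z ∈ b :: t := (List.destutter'_sublist (R := (· ≠ ·)) (l := t) b).subset hz
      have hRz : pvBf z a = false := ha z hz'
      by_contra hfz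
      have haz : a = z := pvBf_total a z (Bool.not_eq_true _ ▸ hfz) hRz
      rcases List.mem_cons.mp hz' with rfl | hz'
      · exact hab haz
      · rw [List.pairwise_cons] at htail
        have hzb : pvBf z b = false := htail.1 z hz'
        exact hab (pvBf_total a b (haz ▸ hzb) (ha b List.mem_cons_self))

-- B's result-building fold is adjacent dedup
lemma pv_foldl_eq_destutter' (l acc : List String) (a : String) :
    List.foldl (fun result item =>
      if result.isEmpty || !(result.getLast? == some item) then result ++ [item] else result)
      (acc ++ [a]) l = acc ++ List.destutter' (· ≠ ·) a l := by
  induction l generalizing a acc with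
  | nil => simp [List.destutter']
  | cons b t ih =>
    rw [List.foldl_cons]
    by_cases hab : a = b
    · subst hab
      rw [List.destutter'_cons_neg t (by simp)]
      rw [show (if (acc ++ [a]).isEmpty || !((acc ++ [a]).getLast? == some a)
            then (acc ++ [a]) ++ [a] else acc ++ [a]) = acc ++ [a] from by
        simp]
      exact ih acc a
    · rw [List.destutter'_cons_pos t (by simpa using hab)]
      rw [show (if (acc ++ [a]).isEmpty || !((acc ++ [a]).getLast? == some b)
            then (acc ++ [a]) ++ [b] else acc ++ [a]) = (acc ++ [a]) ++ [b] from by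
        simp [hab]]
      rw [ih (acc ++ [a]) b, List.append_assoc, List.singleton_append]

lemma pv_foldl_eq_destutter (l : List String) :
    List.foldl (fun result item =>
      if result.isEmpty || !(result.getLast? == some item) then result ++ [item] else result)
      [] l = List.destutter (· ≠ ·) l := by
  cases l with
  | nil => rfl
  | cons x t =>
    rw [List.foldl_cons, List.destutter_cons']
    rw [show (if ([] : List String).isEmpty || !(([] : List String).getLast? == some x)
          then ([] : List String) ++ [x] else []) = [] ++ [x] from by simp]
    exact pv_foldl_eq_destutter' t [] x

-- A's collecting loop is dedup of the canonical stream
lemma pv_foldA_eq (gs : List String) (acc : List String) :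
    List.foldl (fun cleaned goal =>
      match pvCanonical goal with
      | none => cleaned
      | some canonical => if cleaned.contains canonical then cleaned else cleaned ++ [canonical]) acc gs
    = List.foldl PySem.Set.add acc (gs.filterMap pvCanonical) := by
  induction gs generalizing acc with
  | nil => simp
  | cons g t ih =>
    cases hc : pvCanonical g with
    | none =>
      simp only [List.foldl_cons, hc, List.filterMap_cons_none hc]
      exact ih acc
    | some c =>
      simp only [List.foldl_cons, hc, List.filterMap_cons_some hc]
      exact ih _

-- B's collecting loop is the canonical stream itself
lemma pv_foldB_eq (gs : List String) (acc : List String) :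
    List.foldl (fun canon goal =>
      match pvCanonical goal with
      | none => canon
      | some c => canon ++ [c]) acc gs = acc ++ gs.filterMap pvCanonical := by
  induction gs generalizing acc with
  | nil => simp
  | cons g t ih =>
    cases hc : pvCanonical g with
    | none =>
      simp only [List.foldl_cons, hc, List.filterMap_cons_none hc]
      exact ih acc
    | some c =>
      simp only [List.foldl_cons, hc, List.filterMap_cons_some hc]
      rw [ih, List.append_assoc, List.singleton_append]

-- core: sort-of-dedup = adjacent-dedup-of-sort
lemma pv_main (L : List String) :
    PySem.List.sorted2 (PySem.List.dedup L) (fun item => -(pvGoalPriority.getD item 50)) (fun item => item) false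
      = List.foldl (fun result item =>
          if result.isEmpty || !(result.getLast? == some item) then result ++ [item] else result)
          []
          (PySem.List.sorted2 L (fun item => -(pvGoalPriority.getD item 50)) (fun item => item) false) := by
  rw [pv_foldl_eq_destutter]
  -- the A side: sorted, nodup, hence strictly sorted
  have hA_pair : (PySem.List.sorted2 (PySem.List.dedup L)
      (fun item => -(pvGoalPriority.getD item 50)) (fun item => item) false).Pairwise
      (fun a b => pvBf b a = false) := by
    rw [pv_sorted2_eq]
    exact pv_pairwise_foldl_insertBy pvBf pvBf_asym pvBf_negtrans _ [] List.Pairwise.nil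
  have hA_perm := PySem.List.sorted2_perm (PySem.List.dedup L)
      (fun item => -(pvGoalPriority.getD item 50)) (fun item => item) false
  have hA_nodup : (PySem.List.sorted2 (PySem.List.dedup L)
      (fun item => -(pvGoalPriority.getD item 50)) (fun item => item) false).Nodup :=
    hA_perm.nodup_iff.mpr (PySem.List.nodup_dedup L)
  have hA_bf : (PySem.List.sorted2 (PySem.List.dedup L)
      (fun item => -(pvGoalPriority.getD item 50)) (fun item => item) false).Pairwise
      (fun a b => pvBf a b = true) := by
    refine (hA_pair.and hA_nodup).imp ?_
    rintro a b ⟨hle, hne⟩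
    by_contra hf
    exact hne (pvBf_total a b (Bool.not_eq_true _ ▸ hf) hle)
  -- the B side
  have hSL_pair : (PySem.List.sorted2 L
      (fun item => -(pvGoalPriority.getD item 50)) (fun item => item) false).Pairwise
      (fun a b => pvBf b a = false) := by
    rw [pv_sorted2_eq]
    exact pv_pairwise_foldl_insertBy pvBf pvBf_asym pvBf_negtrans _ [] List.Pairwise.nil
  have hSL_perm := PySem.List.sorted2_perm L
      (fun item => -(pvGoalPriority.getD item 50)) (fun item => item) false
  have hB_bf : (List.destutter (· ≠ ·) (PySem.List.sorted2 L
      (fun item => -(pvGoalPriority.getD item 50)) (fun item => item) false)).Pairwise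
      (fun a b => pvBf a b = true) := by
    cases hSL : PySem.List.sorted2 L
        (fun item => -(pvGoalPriority.getD item 50)) (fun item => item) false with
    | nil => simp [List.destutter]
    | cons a l =>
      rw [List.destutter_cons']
      exact pv_pairwise_destutter' l a (hSL ▸ hSL_pair)
  have hB_mem : ∀ x, x ∈ List.destutter (· ≠ ·) (PySem.List.sorted2 L
      (fun item => -(pvGoalPriority.getD item 50)) (fun item => item) false) ↔ x ∈ L := by
    intro x
    constructor
    · intro hx
      exact hSL_perm.subset ((List.destutter_sublist _ _).subset hx)
    · intro hx
      have hx' := hSL_perm.mem_iff.mpr hx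
      cases hSL : PySem.List.sorted2 L
          (fun item => -(pvGoalPriority.getD item 50)) (fun item => item) false with
      | nil => rw [hSL] at hx'; exact absurd hx' (List.not_mem_nil)
      | cons a l =>
        rw [List.destutter_cons']
        exact pv_mem_destutter' l a x (hSL ▸ hx')
  have hB_nodup : (List.destutter (· ≠ ·) (PySem.List.sorted2 L
      (fun item => -(pvGoalPriority.getD item 50)) (fun item => item) false)).Nodup := by
    refine hB_bf.imp ?_
    intro a b hab heq
    rw [heq] at hab
    exact absurd hab (by simp [pvBf_asym b b hab])
  have hperm : (PySem.List.sorted2 (PySem.List.dedup L)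
      (fun item => -(pvGoalPriority.getD item 50)) (fun item => item) false).Perm
      (List.destutter (· ≠ ·) (PySem.List.sorted2 L
        (fun item => -(pvGoalPriority.getD item 50)) (fun item => item) false)) := by
    refine hA_perm.trans (List.perm_of_nodup_nodup_toFinset_eq (PySem.List.nodup_dedup L) hB_nodup ?_)
    ext x
    simp only [List.mem_toFinset]
    rw [PySem.List.mem_dedup, hB_mem]
  exact List.Perm.eq_of_pairwise
    (fun a b _ _ h1 h2 => absurd (pvBf_asym a b h1) (by simp [h2])) hA_bf hB_bf hperm

-- ===== VERDICT (by name: the statement is the Claim_ definition above) =====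
theorem prioritize_goals_py_spec : Claim_equal_prioritize_goals_py := by
  intro goals _
  unfold Spec_prioritize_goals_py prioritize_goals_py prioritize_goals_py_alt
  rw [pv_foldA_eq, pv_foldB_eq, List.nil_append]
  rw [← PySem.Set.ofList_eq_foldl]
  exact pv_main (goals.filterMap pvCanonical)
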